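-- pv_equiv track=rewrite | github.com/Jv131103/estudos_logica | lab/python/somas/somar_listas.py | somar_listas_completo2
-- ===== SOURCE A (Python) =====
-- def somar_listas_completo2(l1, l2):
--     if not l1 or not l2:
--         raise ValueError("As listas não podem ser vazias!")
--
--     min_len = min(len(l1), len(l2))
--     soma = [l1[i] + l2[i] for i in range(min_len)]
--     # Apenas uma dessas fatias terá conteúdo
--     soma.extend(l1[min_len:])
--     soma.extend(l2[min_len:])
--     return soma
-- ===== SOURCE B (Python) =====
-- def somar_listas_completo2(l1, l2):
--     if not l1 or not l2:
--         raise ValueError("As listas não podem ser vazias!")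
--
--     n1, n2 = len(l1), len(l2)
--     return [(l1[i] if i < n1 else 0) + (l2[i] if i < n2 else 0)
--             for i in range(max(n1, n2))]
-- ===== Notes on version B (the rewrite author's own statement) =====
-- stated objective: simpler
-- what changed: Instead of A's min-length pairwise-sum pass followed by two slice extends, B conceptually zero-pads both lists to the max length and sums elementwise in one uniform comprehension with no tail handling.
import Mathlib
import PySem

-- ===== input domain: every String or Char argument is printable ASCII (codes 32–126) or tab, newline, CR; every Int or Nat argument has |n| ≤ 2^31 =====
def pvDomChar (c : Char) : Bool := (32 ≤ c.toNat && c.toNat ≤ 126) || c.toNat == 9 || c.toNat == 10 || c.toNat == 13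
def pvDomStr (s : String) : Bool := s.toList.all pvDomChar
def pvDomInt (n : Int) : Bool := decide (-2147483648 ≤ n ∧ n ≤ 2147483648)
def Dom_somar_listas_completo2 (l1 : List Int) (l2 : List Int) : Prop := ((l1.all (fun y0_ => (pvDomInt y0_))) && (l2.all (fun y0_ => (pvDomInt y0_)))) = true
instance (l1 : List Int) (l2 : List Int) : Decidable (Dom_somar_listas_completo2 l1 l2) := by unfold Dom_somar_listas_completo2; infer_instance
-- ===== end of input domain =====

-- B conceptually zero-pads both lists to the max length and sums elementwise in one
-- uniform comprehension, with no min-length split or tail extends (objective: simpler).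


-- ===== PORT A =====
-- indices i < min length are always in range, so l.getD i 0 is exactly Python's l[i] here
def somar_listas_completo2 (l1 : List Int) (l2 : List Int) : List Int :=
  let minLen := min l1.length l2.length
  let soma := (List.range minLen).map (fun i => l1.getD i 0 + l2.getD i 0)
  let soma := soma ++ l1.drop minLen
  let soma := soma ++ l2.drop minLen
  soma

-- ===== PORT B =====
-- i in range(max n1 n2); the branches 'l[i] if i < n else 0' are the zero padding
def somar_listas_completo2_alt (l1 : List Int) (l2 : List Int) : List Int :=
  (List.range (max l1.length l2.length)).map
    (fun i => (if i < l1.length then l1.getD i 0 else 0)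
            + (if i < l2.length then l2.getD i 0 else 0))

-- ===== PRECONDITION & SPEC =====
-- Pre_ excludes exactly the inputs on which A (and B) raise ValueError: an empty list.
def Pre_somar_listas_completo2 (l1 : List Int) (l2 : List Int) : Prop := l1 ≠ [] ∧ l2 ≠ []
instance (l1 : List Int) (l2 : List Int) : Decidable (Pre_somar_listas_completo2 l1 l2) := by unfold Pre_somar_listas_completo2; infer_instance
def pvWitness_somar_listas_completo2 : List Int × List Int := ([1, 2, 3], [10, 20])

def Spec_somar_listas_completo2 (l1 : List Int) (l2 : List Int) (out : List Int) : Prop := out = somar_listas_completo2_alt l1 l2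
instance (l1 : List Int) (l2 : List Int) (out : List Int) : Decidable (Spec_somar_listas_completo2 l1 l2 out) := by unfold Spec_somar_listas_completo2; infer_instance

-- ===== CLAIM (what is proved, stated in full; the proofs are below) =====
def Claim_equal_somar_listas_completo2 : Prop := ∀ (l1 : List Int) (l2 : List Int), Dom_somar_listas_completo2 l1 l2 → Pre_somar_listas_completo2 l1 l2 → Spec_somar_listas_completo2 l1 l2 (somar_listas_completo2 l1 l2)

-- ===== LEMMAS AND PROOFS =====

-- mapping the in-range padded lookup over range(len) reproduces the list
theorem pad_map (l : List Int) :
    (List.range l.length).map (fun i => if i < l.length then l.getD i 0 else 0) = l := by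
  induction l with
  | nil => simp
  | cons x a ih =>
    simp only [List.length_cons, List.range_succ_eq_map, List.map_cons, List.map_map,
      Function.comp_def, Nat.zero_lt_succ, if_true, List.getD_cons_zero, List.getD_cons_succ,
      Nat.succ_lt_succ_iff]
    rw [ih]

theorem somar_eq (l1 l2 : List Int) :
    somar_listas_completo2 l1 l2 = somar_listas_completo2_alt l1 l2 := by
  unfold somar_listas_completo2 somar_listas_completo2_alt
  induction l1 generalizing l2 with
  | nil => simpa using (pad_map l2).symm
  | cons x a ih =>
    cases l2 with
    | nil => simpa using (pad_map (x :: a)).symm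
    | cons y b =>
      have hmin : min (a.length + 1) (b.length + 1) = min a.length b.length + 1 := by omega
      have hmax : max (a.length + 1) (b.length + 1) = max a.length b.length + 1 := by omega
      simp only [List.length_cons, hmin, hmax, List.range_succ_eq_map, List.map_cons,
        List.map_map, List.drop_succ_cons, Function.comp_def, List.getD_cons_succ,
        List.getD_cons_zero, Nat.zero_lt_succ, if_true, List.cons_append,
        Nat.succ_lt_succ_iff]
      have := ih b
      simp only at this
      rw [this]

-- ===== VERDICT (by name: the statement is the Claim_ definition above) =====
theorem somar_listas_completo2_spec : Claim_equal_somar_listas_completo2 := by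
  intro l1 l2 _ _
  exact somar_eq l1 l2
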